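-- pv_equiv track=rewrite | github.com/doehy/algorithm | Programmers/tik_tak_to.py | check
-- ===== SOURCE A (Python) =====
-- from collections import deque
--
-- def o_check(board, dx, i, j): #밑으로만 쭉
--     flag = 0
--     q = deque()
--     for k in range(4):
--         visited = [[0] * 3 for _ in range(3)]
--         q.append((i,j))
--         visited[i][j] = 1
--         while q:
--             x,y = q.popleft()
--             nx = x + dx[k][0]
--             ny = y + dx[k][1]
--             if 0 <= nx < 3 and 0 <= ny < 3 and board[nx][ny] == 'O':
--                 if visited[nx][ny] == 0:
--                     visited[nx][ny] = visited[x][y] + 1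
--                     q.append((nx,ny))
--                     flag = max(flag,visited[nx][ny])
--     return flag
--
-- def x_check(board, dx, i, j):
--     flag = 0
--     q = deque()
--     for k in range(4):
--         visited = [[0] * 3 for _ in range(3)]
--         q.append((i,j))
--         visited[i][j] = 1
--         while q:
--             x,y = q.popleft()
--             nx = x + dx[k][0]
--             ny = y + dx[k][1]
--             if 0 <= nx < 3 and 0 <= ny < 3 and board[nx][ny] == 'X':
--                 if visited[nx][ny] == 0:
--                     visited[nx][ny] = visited[x][y] + 1
--                     q.append((nx,ny))
--                     flag = max(flag,visited[nx][ny])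
--     return flag
--
-- def check(board): # 게임이 끝났어야 하는지 구조를 파악
--     dx = [[1,0],[0,1],[1,1],[1,-1]]
--     o_flag, x_flag, flag = 0, 0, 0
--     for i in range(3):
--         for j in range(3):
--             if board[i][j] == 'O':
--                 o_flag = max(o_flag, o_check(board,dx,i,j))
--
--     for i in range(3):
--         for j in range(3):
--             if board[i][j] == 'X':
--                 x_flag = max(x_flag, x_check(board, dx, i, j))
--
--     return o_flag, x_flag
-- ===== SOURCE B (Python) =====
-- # B: direct line-scan instead of per-cell BFS: 3 if a full row/col/diagonal of the
-- # symbol exists, else 2 if any adjacent pair (down/right/diag/anti-diag), else 0.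
-- LINES = (
--     [(0, 0), (0, 1), (0, 2)], [(1, 0), (1, 1), (1, 2)], [(2, 0), (2, 1), (2, 2)],
--     [(0, 0), (1, 0), (2, 0)], [(0, 1), (1, 1), (2, 1)], [(0, 2), (1, 2), (2, 2)],
--     [(0, 0), (1, 1), (2, 2)], [(0, 2), (1, 1), (2, 0)],
-- )
--
-- DIRS = ((1, 0), (0, 1), (1, 1), (1, -1))
--
-- def _score(g):
--     if any(all(g[i][j] for i, j in line) for line in LINES):
--         return 3
--     for i in range(3):
--         for j in range(3):
--             if g[i][j]:
--                 for di, dj in DIRS: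
--                     ni, nj = i + di, j + dj
--                     if 0 <= ni < 3 and 0 <= nj < 3 and g[ni][nj]:
--                         return 2
--     return 0
--
-- def _longest(board, c):
--     return _score([[board[i][j] == c for j in range(3)] for i in range(3)])
--
-- def check(board):
--     return (_longest(board, 'O'), _longest(board, 'X'))
-- ===== Notes on version B (the rewrite author's own statement) =====
-- stated objective: simpler
-- what changed: Replaces the per-cell, per-direction BFS with a visited matrix and a deque by a direct scan: 3 if some of the 8 board lines is entirely the symbol, else 2 if some adjacent pair in the four directions is, else 0.
import Mathlib
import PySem

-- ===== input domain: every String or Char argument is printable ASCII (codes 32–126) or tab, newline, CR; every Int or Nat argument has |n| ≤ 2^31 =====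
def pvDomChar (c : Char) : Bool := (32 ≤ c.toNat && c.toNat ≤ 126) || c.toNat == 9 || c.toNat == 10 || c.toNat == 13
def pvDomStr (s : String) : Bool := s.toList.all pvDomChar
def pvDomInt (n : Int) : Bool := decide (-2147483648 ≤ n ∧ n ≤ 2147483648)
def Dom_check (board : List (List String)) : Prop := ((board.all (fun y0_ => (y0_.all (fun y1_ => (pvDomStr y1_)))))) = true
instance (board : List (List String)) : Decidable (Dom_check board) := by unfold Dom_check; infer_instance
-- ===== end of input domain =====

-- B replaces the per-cell directional BFS by a direct scan of the 8 full lines and the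
-- 4 adjacency directions (3 if a full line of the symbol exists, else 2 on any adjacent
-- pair, else 0); equivalence of the RETURN VALUES is proved on all boards A accepts.

-- ===== PORT A =====
-- board[x][y]: indices are guarded in range 0..2 at every use site inside Pre_, so the
-- "" default of getD is never reached there (exact).
def bGet (board : List (List String)) (x y : Int) : String :=
  (PySem.List.pyGet? ((PySem.List.pyGet? board x).getD []) y).getD ""

-- visited[x][y] read/write; indices guarded 0 ≤ _ < 3 at every use, so .toNat is exact.
def vGet (v : List (List Int)) (x y : Int) : Int :=
  (v.getD x.toNat []).getD y.toNat 0

def vSet (v : List (List Int)) (x y : Int) (n : Int) : List (List Int) :=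
  v.set x.toNat ((v.getD x.toNat []).set y.toNat n)

-- the `while q:` loop of o_check; fuel 10 is an upper bound on its iterations (each
-- append marks one of the 9 cells visited, so pops ≤ appends + 1 ≤ 10); on every input
-- admitted by Pre_ the queue empties before the fuel does, so the fuel-0 arm is unreachable.
def bfsO (board : List (List String)) (d : Int × Int) :
    Nat → List (Int × Int) → List (List Int) → Int → Int
  | 0, _, _, flag => flag
  | _ + 1, [], _, flag => flag
  | fuel + 1, (x, y) :: rest, visited, flag =>
    if 0 ≤ x + d.1 ∧ x + d.1 < 3 ∧ 0 ≤ y + d.2 ∧ y + d.2 < 3 ∧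
        bGet board (x + d.1) (y + d.2) = "O" then
      if vGet visited (x + d.1) (y + d.2) = 0 then
        bfsO board d fuel (rest ++ [(x + d.1, y + d.2)])
          (vSet visited (x + d.1) (y + d.2) (vGet visited x y + 1))
          (max flag (vGet (vSet visited (x + d.1) (y + d.2) (vGet visited x y + 1))
            (x + d.1) (y + d.2)))
      else bfsO board d fuel rest visited flag
    else bfsO board d fuel rest visited flag

def o_check (board : List (List String)) (dx : List (Int × Int)) (i j : Int) : Int :=
  (PySem.List.pyRange 0 4 1).foldl (fun flag k =>
    bfsO board ((PySem.List.pyGet? dx k).getD (0, 0)) 10 [(i, j)]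
      (vSet (List.replicate 3 (List.replicate 3 (0 : Int))) i j 1) flag) 0

-- x_check / its while loop: Python duplicates the code with 'X'; the port does too.
def bfsX (board : List (List String)) (d : Int × Int) :
    Nat → List (Int × Int) → List (List Int) → Int → Int
  | 0, _, _, flag => flag
  | _ + 1, [], _, flag => flag
  | fuel + 1, (x, y) :: rest, visited, flag =>
    if 0 ≤ x + d.1 ∧ x + d.1 < 3 ∧ 0 ≤ y + d.2 ∧ y + d.2 < 3 ∧
        bGet board (x + d.1) (y + d.2) = "X" then
      if vGet visited (x + d.1) (y + d.2) = 0 then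
        bfsX board d fuel (rest ++ [(x + d.1, y + d.2)])
          (vSet visited (x + d.1) (y + d.2) (vGet visited x y + 1))
          (max flag (vGet (vSet visited (x + d.1) (y + d.2) (vGet visited x y + 1))
            (x + d.1) (y + d.2)))
      else bfsX board d fuel rest visited flag
    else bfsX board d fuel rest visited flag

def x_check (board : List (List String)) (dx : List (Int × Int)) (i j : Int) : Int :=
  (PySem.List.pyRange 0 4 1).foldl (fun flag k =>
    bfsX board ((PySem.List.pyGet? dx k).getD (0, 0)) 10 [(i, j)]
      (vSet (List.replicate 3 (List.replicate 3 (0 : Int))) i j 1) flag) 0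

def check (board : List (List String)) : Int × Int :=
  let dx : List (Int × Int) := [(1, 0), (0, 1), (1, 1), (1, -1)]
  let o_flag := (PySem.List.pyRange 0 3 1).foldl (fun acc i =>
    (PySem.List.pyRange 0 3 1).foldl (fun acc j =>
      if bGet board i j = "O" then max acc (o_check board dx i j) else acc) acc) 0
  let x_flag := (PySem.List.pyRange 0 3 1).foldl (fun acc i =>
    (PySem.List.pyRange 0 3 1).foldl (fun acc j =>
      if bGet board i j = "X" then max acc (x_check board dx i j) else acc) acc) 0
  (o_flag, x_flag)

-- ===== PORT B =====
def sGet (board : List (List String)) (i j : Nat) : String :=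
  (board.getD i []).getD j ""

def gGet (g : List (List Bool)) (i j : Nat) : Bool :=
  (g.getD i []).getD j false

def linesB : List (List (Nat × Nat)) :=
  [[(0, 0), (0, 1), (0, 2)], [(1, 0), (1, 1), (1, 2)], [(2, 0), (2, 1), (2, 2)],
   [(0, 0), (1, 0), (2, 0)], [(0, 1), (1, 1), (2, 1)], [(0, 2), (1, 2), (2, 2)],
   [(0, 0), (1, 1), (2, 2)], [(0, 2), (1, 1), (2, 0)]]

def dirsB : List (Int × Int) := [(1, 0), (0, 1), (1, 1), (1, -1)]

def scoreG (g : List (List Bool)) : Int :=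
  if linesB.any (fun ln => ln.all (fun p => gGet g p.1 p.2)) then 3
  else if (List.range 3).any (fun i => (List.range 3).any (fun j =>
      gGet g i j && dirsB.any (fun d =>
        decide (0 ≤ (i : Int) + d.1) && decide ((i : Int) + d.1 < 3) &&
        decide (0 ≤ (j : Int) + d.2) && decide ((j : Int) + d.2 < 3) &&
        gGet g ((i : Int) + d.1).toNat ((j : Int) + d.2).toNat))) then 2
  else 0

def mkMask (board : List (List String)) (c : String) : List (List Bool) :=
  (List.range 3).map (fun i => (List.range 3).map (fun j => sGet board i j == c))

def longestB (board : List (List String)) (c : String) : Int :=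
  scoreG (mkMask board c)

def check_alt (board : List (List String)) : Int × Int :=
  (longestB board "O", longestB board "X")

-- ===== PRECONDITION & SPEC =====
-- Pre_ excludes exactly the boards on which Python A raises IndexError: fewer than 3
-- rows, or one of the first three rows shorter than 3.
def Pre_check (board : List (List String)) : Prop :=
  3 ≤ board.length ∧ ∀ r ∈ board.take 3, 3 ≤ r.length
instance (board : List (List String)) : Decidable (Pre_check board) := by
  unfold Pre_check; infer_instance

def pvWitness_check : List (List String) :=
  [["O", "X", "O"], ["X", "O", "X"], ["O", "X", "X"]]

def Spec_check (board : List (List String)) (out : Int × Int) : Prop := out = check_alt board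
instance (board : List (List String)) (out : Int × Int) : Decidable (Spec_check board out) := by
  unfold Spec_check; infer_instance

-- ===== CLAIM (what is proved, stated in full; the proofs are below) =====
def Claim_equal_check : Prop :=
  ∀ (board : List (List String)), Dom_check board → Pre_check board →
    Spec_check board (check board)

-- ===== LEMMAS AND PROOFS =====

-- mask-level clones of A's algorithm (proof devices, used only below)
def bfsM (m : List (List Bool)) (d : Int × Int) :
    Nat → List (Int × Int) → List (List Int) → Int → Int
  | 0, _, _, flag => flag
  | _ + 1, [], _, flag => flag
  | fuel + 1, (x, y) :: rest, visited, flag =>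
    if 0 ≤ x + d.1 ∧ x + d.1 < 3 ∧ 0 ≤ y + d.2 ∧ y + d.2 < 3 ∧
        gGet m (x + d.1).toNat (y + d.2).toNat = true then
      if vGet visited (x + d.1) (y + d.2) = 0 then
        bfsM m d fuel (rest ++ [(x + d.1, y + d.2)])
          (vSet visited (x + d.1) (y + d.2) (vGet visited x y + 1))
          (max flag (vGet (vSet visited (x + d.1) (y + d.2) (vGet visited x y + 1))
            (x + d.1) (y + d.2)))
      else bfsM m d fuel rest visited flag
    else bfsM m d fuel rest visited flag

def oCheckM (m : List (List Bool)) (i j : Int) : Int :=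
  (PySem.List.pyRange 0 4 1).foldl (fun flag k =>
    bfsM m ((PySem.List.pyGet? ([(1, 0), (0, 1), (1, 1), (1, -1)] : List (Int × Int)) k).getD (0, 0))
      10 [(i, j)] (vSet (List.replicate 3 (List.replicate 3 (0 : Int))) i j 1) flag) 0

def scoreM (m : List (List Bool)) : Int :=
  (PySem.List.pyRange 0 3 1).foldl (fun acc i =>
    (PySem.List.pyRange 0 3 1).foldl (fun acc j =>
      if gGet m i.toNat j.toNat = true then max acc (oCheckM m i j) else acc) acc) 0

theorem bfs_simO (board : List (List String)) (m : List (List Bool)) (c : String)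
    (H : ∀ x y : Int, 0 ≤ x → x < 3 → 0 ≤ y → y < 3 →
      ((bGet board x y = c) ↔ (gGet m x.toNat y.toNat = true)))
    (hc : c = "O") :
    ∀ (d : Int × Int) (fuel : Nat) (q : List (Int × Int)) (v : List (List Int)) (f : Int),
      bfsO board d fuel q v f = bfsM m d fuel q v f := by
  intro d fuel
  induction fuel with
  | zero => intro q v f; cases q <;> rfl
  | succ n ih =>
    intro q v f
    cases q with
    | nil => rfl
    | cons p rest =>
      obtain ⟨x, y⟩ := p
      subst hc
      simp only [bfsO, bfsM]
      have hiff : (0 ≤ x + d.1 ∧ x + d.1 < 3 ∧ 0 ≤ y + d.2 ∧ y + d.2 < 3 ∧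
          bGet board (x + d.1) (y + d.2) = "O") =
          (0 ≤ x + d.1 ∧ x + d.1 < 3 ∧ 0 ≤ y + d.2 ∧ y + d.2 < 3 ∧
          gGet m (x + d.1).toNat (y + d.2).toNat = true) := by
        apply propext
        constructor
        · rintro ⟨h1, h2, h3, h4, h5⟩
          exact ⟨h1, h2, h3, h4, (H _ _ h1 h2 h3 h4).mp h5⟩
        · rintro ⟨h1, h2, h3, h4, h5⟩
          exact ⟨h1, h2, h3, h4, (H _ _ h1 h2 h3 h4).mpr h5⟩
      simp only [hiff]
      split_ifs <;> exact ih _ _ _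

theorem bfs_simX (board : List (List String)) (m : List (List Bool)) (c : String)
    (H : ∀ x y : Int, 0 ≤ x → x < 3 → 0 ≤ y → y < 3 →
      ((bGet board x y = c) ↔ (gGet m x.toNat y.toNat = true)))
    (hc : c = "X") :
    ∀ (d : Int × Int) (fuel : Nat) (q : List (Int × Int)) (v : List (List Int)) (f : Int),
      bfsX board d fuel q v f = bfsM m d fuel q v f := by
  intro d fuel
  induction fuel with
  | zero => intro q v f; cases q <;> rfl
  | succ n ih =>
    intro q v f
    cases q with
    | nil => rfl
    | cons p rest =>
      obtain ⟨x, y⟩ := p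
      subst hc
      simp only [bfsX, bfsM]
      have hiff : (0 ≤ x + d.1 ∧ x + d.1 < 3 ∧ 0 ≤ y + d.2 ∧ y + d.2 < 3 ∧
          bGet board (x + d.1) (y + d.2) = "X") =
          (0 ≤ x + d.1 ∧ x + d.1 < 3 ∧ 0 ≤ y + d.2 ∧ y + d.2 < 3 ∧
          gGet m (x + d.1).toNat (y + d.2).toNat = true) := by
        apply propext
        constructor
        · rintro ⟨h1, h2, h3, h4, h5⟩
          exact ⟨h1, h2, h3, h4, (H _ _ h1 h2 h3 h4).mp h5⟩
        · rintro ⟨h1, h2, h3, h4, h5⟩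
          exact ⟨h1, h2, h3, h4, (H _ _ h1 h2 h3 h4).mpr h5⟩
      simp only [hiff]
      split_ifs <;> exact ih _ _ _

theorem ocheck_sim (board : List (List String)) (m : List (List Bool))
    (H : ∀ x y : Int, 0 ≤ x → x < 3 → 0 ≤ y → y < 3 →
      ((bGet board x y = "O") ↔ (gGet m x.toNat y.toNat = true)))
    (i j : Int) :
    o_check board [(1, 0), (0, 1), (1, 1), (1, -1)] i j = oCheckM m i j := by
  have L := bfs_simO board m "O" H rfl
  simp only [o_check, oCheckM, L]

theorem xcheck_sim (board : List (List String)) (m : List (List Bool))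
    (H : ∀ x y : Int, 0 ≤ x → x < 3 → 0 ≤ y → y < 3 →
      ((bGet board x y = "X") ↔ (gGet m x.toNat y.toNat = true)))
    (i j : Int) :
    x_check board [(1, 0), (0, 1), (1, 1), (1, -1)] i j = oCheckM m i j := by
  have L := bfs_simX board m "X" H rfl
  simp only [x_check, oCheckM, L]

theorem check_eq_mask (board : List (List String)) (mO mX : List (List Bool))
    (HO : ∀ x y : Int, 0 ≤ x → x < 3 → 0 ≤ y → y < 3 →
      ((bGet board x y = "O") ↔ (gGet mO x.toNat y.toNat = true)))
    (HX : ∀ x y : Int, 0 ≤ x → x < 3 → 0 ≤ y → y < 3 →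
      ((bGet board x y = "X") ↔ (gGet mX x.toNat y.toNat = true))) :
    check board = (scoreM mO, scoreM mX) := by
  have hr : PySem.List.pyRange 0 3 1 = [(0 : Int), 1, 2] := by decide
  simp only [check, scoreM, hr, List.foldl]
  congr 1
  · simp only [ocheck_sim board mO HO]
    have e : ∀ x y : Int, 0 ≤ x → x < 3 → 0 ≤ y → y < 3 →
        (bGet board x y = "O") = (gGet mO x.toNat y.toNat = true) := fun x y h1 h2 h3 h4 =>
      propext (HO x y h1 h2 h3 h4)
    simp only [e 0 0 (by norm_num) (by norm_num) (by norm_num) (by norm_num),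
      e 0 1 (by norm_num) (by norm_num) (by norm_num) (by norm_num),
      e 0 2 (by norm_num) (by norm_num) (by norm_num) (by norm_num),
      e 1 0 (by norm_num) (by norm_num) (by norm_num) (by norm_num),
      e 1 1 (by norm_num) (by norm_num) (by norm_num) (by norm_num),
      e 1 2 (by norm_num) (by norm_num) (by norm_num) (by norm_num),
      e 2 0 (by norm_num) (by norm_num) (by norm_num) (by norm_num),
      e 2 1 (by norm_num) (by norm_num) (by norm_num) (by norm_num),
      e 2 2 (by norm_num) (by norm_num) (by norm_num) (by norm_num)]
  · simp only [xcheck_sim board mX HX]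
    have e : ∀ x y : Int, 0 ≤ x → x < 3 → 0 ≤ y → y < 3 →
        (bGet board x y = "X") = (gGet mX x.toNat y.toNat = true) := fun x y h1 h2 h3 h4 =>
      propext (HX x y h1 h2 h3 h4)
    simp only [e 0 0 (by norm_num) (by norm_num) (by norm_num) (by norm_num),
      e 0 1 (by norm_num) (by norm_num) (by norm_num) (by norm_num),
      e 0 2 (by norm_num) (by norm_num) (by norm_num) (by norm_num),
      e 1 0 (by norm_num) (by norm_num) (by norm_num) (by norm_num),
      e 1 1 (by norm_num) (by norm_num) (by norm_num) (by norm_num),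
      e 1 2 (by norm_num) (by norm_num) (by norm_num) (by norm_num),
      e 2 0 (by norm_num) (by norm_num) (by norm_num) (by norm_num),
      e 2 1 (by norm_num) (by norm_num) (by norm_num) (by norm_num),
      e 2 2 (by norm_num) (by norm_num) (by norm_num) (by norm_num)]

-- the finite heart of the proof: A's directional-BFS score and B's line-scan score
-- agree on every 3×3 boolean mask (512 cases)
theorem score_eq_bool : ∀ b00 b01 b02 b10 b11 b12 b20 b21 b22 : Bool,
    scoreM [[b00, b01, b02], [b10, b11, b12], [b20, b21, b22]] =
      scoreG [[b00, b01, b02], [b10, b11, b12], [b20, b21, b22]] := by decide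

theorem mask_lookup (a00 a01 a02 a10 a11 a12 a20 a21 a22 : String)
    (t0 t1 t2 : List String) (rest : List (List String)) (s : String) :
    ∀ x y : Int, 0 ≤ x → x < 3 → 0 ≤ y → y < 3 →
      ((bGet ((a00 :: a01 :: a02 :: t0) :: (a10 :: a11 :: a12 :: t1) ::
          (a20 :: a21 :: a22 :: t2) :: rest) x y = s) ↔
        (gGet (mkMask ((a00 :: a01 :: a02 :: t0) :: (a10 :: a11 :: a12 :: t1) ::
          (a20 :: a21 :: a22 :: t2) :: rest) s) x.toNat y.toNat = true)) := by
  intro x y h1 h2 h3 h4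
  interval_cases x <;> interval_cases y <;>
    simp [bGet, gGet, mkMask, sGet, PySem.List.pyGet?_of_nonneg, beq_iff_eq]

-- ===== VERDICT (by name: the statement is the Claim_ definition above) =====
theorem check_spec : Claim_equal_check := by
  intro board _ hpre
  obtain ⟨hlen, hrows⟩ := hpre
  match board, hlen with
  | (r0 :: r1 :: r2 :: rest), _ =>
    have h0 : 3 ≤ r0.length := hrows r0 (by simp)
    have h1 : 3 ≤ r1.length := hrows r1 (by simp)
    have h2 : 3 ≤ r2.length := hrows r2 (by simp)
    match r0, h0 with
    | (a00 :: a01 :: a02 :: t0), _ =>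
    match r1, h1 with
    | (a10 :: a11 :: a12 :: t1), _ =>
    match r2, h2 with
    | (a20 :: a21 :: a22 :: t2), _ =>
      show Spec_check _ _
      unfold Spec_check
      have HO := mask_lookup a00 a01 a02 a10 a11 a12 a20 a21 a22 t0 t1 t2 rest "O"
      have HX := mask_lookup a00 a01 a02 a10 a11 a12 a20 a21 a22 t0 t1 t2 rest "X"
      rw [check_eq_mask _ _ _ HO HX]
      have hO : mkMask ((a00 :: a01 :: a02 :: t0) :: (a10 :: a11 :: a12 :: t1) ::
          (a20 :: a21 :: a22 :: t2) :: rest) "O" =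
          [[a00 == "O", a01 == "O", a02 == "O"], [a10 == "O", a11 == "O", a12 == "O"],
           [a20 == "O", a21 == "O", a22 == "O"]] := rfl
      have hX : mkMask ((a00 :: a01 :: a02 :: t0) :: (a10 :: a11 :: a12 :: t1) ::
          (a20 :: a21 :: a22 :: t2) :: rest) "X" =
          [[a00 == "X", a01 == "X", a02 == "X"], [a10 == "X", a11 == "X", a12 == "X"],
           [a20 == "X", a21 == "X", a22 == "X"]] := rfl
      show _ = check_alt _
      simp only [check_alt, longestB, hO, hX, score_eq_bool]
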